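-- pv_equiv track=rewrite | github.com/RATED-R-SUNDRAM/ONLINE_CONTEST | FLU_PREDICTION/temp.py | erase_in_non_decreasing_order
-- ===== SOURCE A (Python) =====
-- def erase_in_non_decreasing_order(arr):
--     def find_next_min_index(start, arr):
--         min_val = float('inf')
--         min_index = -1
--         for i in range(start, len(arr)):
--             if arr[i] < min_val:
--                 min_val = arr[i]
--                 min_index = i
--         return min_index
--
--     operations = 0
--     p = 0
--     pop_cnt=0
--     while arr:
--         next_min_index = find_next_min_index(p, arr)
--         # Increment or decrement pointer to reach next minimum element
--         while p != next_min_index: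
--             if p < next_min_index:
--                 p += 1  # Increment pointer
--             else:
--                 p -= 1  # Decrement pointer
--             operations += 1
--         # Erase the element
--         arr.pop(p)
--
--         operations += 1
--         # Choose where to point p after erasing the element
--         if p == len(arr):  # If p is at the end, move it to the previous element
--             p -= 1
--         # No need to move p if it's not at the end as it will automatically point to the next element
--
--     return operations
-- ===== SOURCE B (Python) =====
-- def erase_in_non_decreasing_order(arr):
--     # O(n) closed form: the pointer only walks right chasing successive suffix
--     # minima (one "chain" element per pop at distance covering each index once),
--     # then retreats popping at cost 1 each; total operations = 2*n - k where k
--     # is the number of indices i with arr[i] <= min(arr[i+1:]) (right-to-left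
--     # running non-strict minima).  Does not mutate arr (A empties it in place).
--     n = len(arr)
--     if n == 0:
--         return 0
--     count = 0
--     running = None
--     for x in reversed(arr):
--         if running is None or x <= running:
--             count += 1
--         running = x if running is None else min(running, x)
--     return 2 * n - count
-- ===== Notes on version B (the rewrite author's own statement) =====
-- stated objective: faster
-- what changed: Replaced the O(n^2) pointer/pop simulation by a single right-to-left pass: the answer equals 2*n minus the number of right-to-left running non-strict minima (the suffix-min chain the pointer visits), so no simulation or repeated scans are needed; B also does not mutate arr, while A empties it in place (return value equivalence only).
import Mathlib
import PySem

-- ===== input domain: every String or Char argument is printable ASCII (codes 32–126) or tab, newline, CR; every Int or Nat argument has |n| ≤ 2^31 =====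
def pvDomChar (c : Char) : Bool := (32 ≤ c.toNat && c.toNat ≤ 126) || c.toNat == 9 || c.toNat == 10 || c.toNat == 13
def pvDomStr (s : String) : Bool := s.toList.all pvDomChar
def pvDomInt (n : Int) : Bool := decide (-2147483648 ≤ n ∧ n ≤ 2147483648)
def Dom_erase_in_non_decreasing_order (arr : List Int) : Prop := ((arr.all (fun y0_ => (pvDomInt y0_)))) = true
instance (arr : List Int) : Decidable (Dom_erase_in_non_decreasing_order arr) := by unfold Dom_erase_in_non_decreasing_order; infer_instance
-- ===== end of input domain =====

-- B replaces A's O(n^2) pointer/pop simulation by one right-to-left pass (answer = 2*n minus the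
-- number of right-to-left running non-strict minima); return-value equivalence only — A empties
-- its argument in place, B does not mutate it.

-- ===== PORT A =====
-- find_next_min_index: fold over range(start, len(arr)); min_val = float('inf') is modelled as
-- `none` (none compares greater than every int, exactly as inf does here).
def pvFindNextMinIndex (start : Int) (arr : List Int) : Int :=
  ((PySem.List.pyRange start arr.length 1).foldl
    (fun (st : Option Int × Int) i =>
      match st.1 with
      | none => (some (PySem.List.pyGetD arr i 0), i)
      | some v =>
        if PySem.List.pyGetD arr i 0 < v then (some (PySem.List.pyGetD arr i 0), i) else st)
    ((none : Option Int), (-1 : Int))).2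

-- the inner `while p != next_min_index` pointer walk, returning (p, operations)
def pvWalk (p target ops : Int) : Int × Int :=
  if p = target then (p, ops)
  else if p < target then pvWalk (p + 1) target (ops + 1)
  else pvWalk (p - 1) target (ops + 1)
termination_by (target - p).natAbs
decreasing_by all_goals omega

-- the outer `while arr:` loop; arr.pop(p) raises only out of range, which the states A reaches
-- (0 ≤ p < len(arr)) never do, so the `none` branch is unreachable.
def pvEraseLoop (arr : List Int) (p ops : Int) : Int :=
  if arr = [] then ops
  else
    match hpop : PySem.List.pop? arr (pvWalk p (pvFindNextMinIndex p arr) ops).1 with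
    | none => (pvWalk p (pvFindNextMinIndex p arr) ops).2 + 1
    | some r =>
      pvEraseLoop r.2
        (if (pvWalk p (pvFindNextMinIndex p arr) ops).1 = (r.2.length : Int)
         then (pvWalk p (pvFindNextMinIndex p arr) ops).1 - 1
         else (pvWalk p (pvFindNextMinIndex p arr) ops).1)
        ((pvWalk p (pvFindNextMinIndex p arr) ops).2 + 1)
termination_by arr.length
decreasing_by
  have := PySem.List.length_of_pop?_eq_some arr hpop; omega

def erase_in_non_decreasing_order (arr : List Int) : Int :=
  pvEraseLoop arr 0 0

-- ===== PORT B =====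
-- one right-to-left step: count a running non-strict minimum, maintain the running minimum
def pvSufStep (x : Int) (st : Int × Option Int) : Int × Option Int :=
  match st.2 with
  | none => (st.1 + 1, some x)
  | some v => ((if x ≤ v then st.1 + 1 else st.1), some (min x v))

def erase_in_non_decreasing_order_alt (arr : List Int) : Int :=
  if arr.length = 0 then 0
  else 2 * (arr.length : Int) - (arr.foldr pvSufStep ((0 : Int), (none : Option Int))).1

-- ===== PRECONDITION & SPEC =====
def Spec_erase_in_non_decreasing_order (arr : List Int) (out : Int) : Prop := out = erase_in_non_decreasing_order_alt arr
instance (arr : List Int) (out : Int) : Decidable (Spec_erase_in_non_decreasing_order arr out) := by unfold Spec_erase_in_non_decreasing_order; infer_instance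

-- ===== CLAIM (what is proved, stated in full; the proofs are below) =====
def Claim_equal_erase_in_non_decreasing_order : Prop := ∀ (arr : List Int), Dom_erase_in_non_decreasing_order arr → Spec_erase_in_non_decreasing_order arr (erase_in_non_decreasing_order arr)

-- ===== LEMMAS AND PROOFS =====

-- proof-side views of B's fold: the count and the running minimum
def pvCnt (xs : List Int) : Int := (xs.foldr pvSufStep ((0 : Int), (none : Option Int))).1
def pvMin? (xs : List Int) : Option Int := (xs.foldr pvSufStep ((0 : Int), (none : Option Int))).2

-- index of the first minimum of xs (first i with xs[i] ≤ min xs[i+1:])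
def pvFmIdx : List Int → Nat
  | [] => 0
  | x :: xs =>
    match pvMin? xs with
    | none => 0
    | some v => if x ≤ v then 0 else pvFmIdx xs + 1

-- proof-side structural version of A's find_next_min_index fold
def pvRunFold : List Int → Int → (Option Int × Int) → (Option Int × Int)
  | [], _, st => st
  | x :: xs, i, st =>
      pvRunFold xs (i + 1)
        (match st.1 with
         | none => (some x, i)
         | some v => if x < v then (some x, i) else st)

theorem pvMin?_eq_none_iff (xs : List Int) : pvMin? xs = none ↔ xs = [] := by
  cases xs with
  | nil => simp [pvMin?]
  | cons x t =>
    simp only [pvMin?, List.foldr_cons, pvSufStep]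
    cases h : (t.foldr pvSufStep ((0 : Int), (none : Option Int))).2 <;> simp

theorem pvFmIdx_lt_length (xs : List Int) (h : xs ≠ []) : pvFmIdx xs < xs.length := by
  induction xs with
  | nil => simp at h
  | cons x t ih =>
    simp only [pvFmIdx]
    cases hm : pvMin? t with
    | none => simp
    | some v =>
      have ht : t ≠ [] := by
        intro he; rw [he] at hm; simp [pvMin?] at hm
      by_cases hx : x ≤ v
      · simp [hx]
      · show (if x ≤ v then 0 else pvFmIdx t + 1) < (x :: t).length
        rw [if_neg hx]
        have := ih ht
        simp only [List.length_cons]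
        omega

theorem pvCnt_cons (x : Int) (xs : List Int) :
    pvCnt (x :: xs) =
      (match pvMin? xs with
       | none => pvCnt xs + 1
       | some v => if x ≤ v then pvCnt xs + 1 else pvCnt xs) := by
  simp only [pvCnt, pvMin?, List.foldr_cons, pvSufStep]
  cases h : (xs.foldr pvSufStep ((0 : Int), (none : Option Int))).2 <;> simp

theorem pvCnt_drop_fm (xs : List Int) (h : xs ≠ []) :
    pvCnt xs = pvCnt (xs.drop (pvFmIdx xs + 1)) + 1 := by
  induction xs with
  | nil => simp at h
  | cons x t ih =>
    rw [pvCnt_cons]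
    cases hm : pvMin? t with
    | none =>
      have ht : t = [] := (pvMin?_eq_none_iff t).mp hm
      subst ht
      simp [pvFmIdx, pvMin?, pvCnt, hm]
    | some v =>
      have ht : t ≠ [] := by
        intro he; rw [he] at hm; simp [pvMin?] at hm
      by_cases hx : x ≤ v
      · simp [pvFmIdx, hm, hx]
      · simp only [pvFmIdx, hm, hx, if_false, if_neg hx]
        rw [ih ht]
        simp

theorem pvCnt_singleton (x : Int) : pvCnt [x] = 1 := by
  simp [pvCnt, pvSufStep]

theorem pvCnt_drop_last (l : List Int) (h : l ≠ []) :
    pvCnt (l.drop (l.length - 1)) = 1 := by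
  induction l with
  | nil => simp at h
  | cons x t ih =>
    cases t with
    | nil => simpa using pvCnt_singleton x
    | cons y u =>
      have ht : (y :: u) ≠ [] := by simp
      have : (x :: y :: u).length - 1 = ((y :: u).length - 1) + 1 := by
        simp
      rw [this, List.drop_succ_cons]
      exact ih ht

-- behaviour of A's fold from a (some v, j) accumulator
theorem pvRunFold_some (xs : List Int) : ∀ (i v j : Int),
    pvRunFold xs i (some v, j) =
      (match pvMin? xs with
       | none => (some v, j)
       | some w => if w < v then (some (min w v), i + (pvFmIdx xs : Int)) else (some v, j)) := by
  induction xs with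
  | nil => intro i v j; simp [pvRunFold, pvMin?]
  | cons x t ih =>
    intro i v j
    have hstep : pvRunFold (x :: t) i (some v, j)
        = pvRunFold t (i + 1) (if x < v then (some x, i) else (some v, j)) := by
      simp only [pvRunFold]
    rw [hstep]
    cases hm : pvMin? t with
    | none =>
      have ht : t = [] := (pvMin?_eq_none_iff t).mp hm
      subst ht
      have hmin1 : pvMin? [x] = some x := by simp [pvMin?, pvSufStep]
      rw [hmin1]
      by_cases hx : x < v
      · rw [if_pos hx]
        simp only [pvRunFold, pvFmIdx, pvMin?, List.foldr_nil, if_pos hx]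
        all_goals simp only [Prod.mk.injEq, Option.some.injEq]
        all_goals omega
      · rw [if_neg hx]
        simp only [pvRunFold, pvFmIdx, pvMin?, List.foldr_nil, if_neg hx]
    | some u =>
      have hmincons : pvMin? (x :: t) = some (min x u) := by
        simp only [pvMin?, List.foldr_cons, pvSufStep]
        have h2 : (t.foldr pvSufStep ((0 : Int), (none : Option Int))).2 = some u := hm
        rw [h2]
      rw [hmincons]
      have hfmcons : (pvFmIdx (x :: t) : Int)
          = if x ≤ u then 0 else (pvFmIdx t : Int) + 1 := by
        simp only [pvFmIdx, hm]
        split_ifs <;> push_cast <;> omega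
      by_cases hx : x < v
      · rw [if_pos hx]
        rw [ih (i + 1) x i, hm, hfmcons]
        simp only []
        by_cases hu : u < x
        · have hxu : ¬ x ≤ u := by omega
          rw [if_pos hu, if_neg hxu, if_pos (show min x u < v by omega)]
          simp only [Prod.mk.injEq, Option.some.injEq]
          refine ⟨by omega, by omega⟩
        · have hxu : x ≤ u := by omega
          rw [if_neg hu, if_pos hxu, if_pos (show min x u < v by omega)]
          simp only [Prod.mk.injEq, Option.some.injEq]
          refine ⟨by omega, by omega⟩
      · rw [if_neg hx]
        rw [ih (i + 1) v j, hm, hfmcons]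
        simp only []
        by_cases hu : u < v
        · have hxu : ¬ x ≤ u := by omega
          rw [if_pos hu, if_neg hxu, if_pos (show min x u < v by omega)]
          simp only [Prod.mk.injEq, Option.some.injEq]
          refine ⟨by omega, by omega⟩
        · rw [if_neg hu, if_neg (show ¬ min x u < v by omega)]

-- bridge: A's fold over range(p, len(arr)) is pvRunFold over arr.drop p.toNat
theorem pvBridge (arr : List Int) : ∀ (k : Nat) (p : Int) (st : Option Int × Int),
    0 ≤ p → arr.length ≤ p.toNat + k →
    (PySem.List.pyRange p arr.length 1).foldl
      (fun (st : Option Int × Int) i =>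
        match st.1 with
        | none => (some (PySem.List.pyGetD arr i 0), i)
        | some v =>
          if PySem.List.pyGetD arr i 0 < v then (some (PySem.List.pyGetD arr i 0), i) else st)
      st
    = pvRunFold (arr.drop p.toNat) p st := by
  intro k
  induction k with
  | zero =>
    intro p st hp hk
    have h1 : (arr.length : Int) ≤ p := by omega
    rw [PySem.List.pyRange_one_eq_nil h1]
    have h2 : arr.drop p.toNat = [] := by
      apply List.drop_eq_nil_of_le; omega
    rw [h2]; rfl
  | succ k ih =>
    intro p st hp hk
    by_cases hlt : p.toNat < arr.length
    · have hplt : p < (arr.length : Int) := by omega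
      rw [PySem.List.pyRange_one_cons hplt, List.foldl_cons]
      rw [List.drop_eq_getElem_cons hlt]
      simp only [pvRunFold]
      have hget : PySem.List.pyGetD arr p 0 = arr[p.toNat] :=
        PySem.List.pyGetD_eq_getElem arr 0 hp hplt
      have hnext := ih (p + 1)
        (match st.1 with
         | none => (some arr[p.toNat], p)
         | some v => if arr[p.toNat] < v then (some arr[p.toNat], p) else st)
        (by omega) (by omega)
      have htn : (p + 1).toNat = p.toNat + 1 := by omega
      rw [htn] at hnext
      rw [hget]
      exact hnext
    · have h1 : (arr.length : Int) ≤ p := by omega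
      rw [PySem.List.pyRange_one_eq_nil h1]
      have h2 : arr.drop p.toNat = [] := by
        apply List.drop_eq_nil_of_le; omega
      rw [h2]; rfl

-- find_next_min_index p arr = p + (index of the first minimum of arr[p:])
theorem pvFindMin_eq (arr : List Int) (p : Int) (hp : 0 ≤ p) (hlt : p.toNat < arr.length) :
    pvFindNextMinIndex p arr = p + (pvFmIdx (arr.drop p.toNat) : Nat) := by
  unfold pvFindNextMinIndex
  rw [pvBridge arr arr.length p _ hp (by omega)]
  obtain ⟨x, t, hxt⟩ : ∃ x t, arr.drop p.toNat = x :: t := by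
    cases h : arr.drop p.toNat with
    | nil =>
      exfalso
      have := List.length_drop (l := arr) (i := p.toNat)
      rw [h] at this; simp at this; omega
    | cons a b => exact ⟨a, b, rfl⟩
  rw [hxt]
  simp only [pvRunFold]
  rw [pvRunFold_some t (p + 1) x p]
  cases hm : pvMin? t with
  | none =>
    simp [pvFmIdx, hm]
  | some u =>
    by_cases hu : u < x
    · have hxle : ¬ x ≤ u := by omega
      simp only [pvFmIdx, hm, if_pos hu, if_neg hxle]
      push_cast; omega
    · have hxle : x ≤ u := by omega
      simp only [pvFmIdx, hm, if_neg hu, if_pos hxle]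
      push_cast; omega

theorem pvWalk_le : ∀ (d : Nat) (p t ops : Int), t = p + d → pvWalk p t ops = (t, ops + d) := by
  intro d
  induction d with
  | zero =>
    intro p t ops h
    rw [pvWalk]
    simp [show p = t by omega]
  | succ d ih =>
    intro p t ops h
    rw [pvWalk]
    rw [if_neg (by omega), if_pos (by omega)]
    rw [ih (p + 1) t (ops + 1) (by push_cast; omega)]
    simp only [Prod.mk.injEq, true_and]
    push_cast; omega

theorem pvDrop_eraseIdx : ∀ (l : List Int) (m : Nat), (l.eraseIdx m).drop m = l.drop (m + 1) := by
  intro l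
  induction l with
  | nil => intro m; simp
  | cons x t ih =>
    intro m
    cases m with
    | zero => simp
    | succ m => simpa using ih m

-- the main invariant: from any state 0 ≤ p < len(arr), A's loop adds 2*len - p - pvCnt(arr[p:])
theorem pvMainLoop : ∀ (n : Nat) (arr : List Int) (p ops : Int),
    arr.length = n → arr ≠ [] → 0 ≤ p → p.toNat < arr.length →
    pvEraseLoop arr p ops = ops + 2 * (arr.length : Int) - p - pvCnt (arr.drop p.toNat) := by
  intro n
  induction n using Nat.strong_induction_on with
  | _ n ih =>
    intro arr p ops hn harr hp hplt
    have hds : arr.drop p.toNat ≠ [] := by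
      intro h
      have := List.length_drop (l := arr) (i := p.toNat)
      rw [h] at this; simp at this; omega
    set fm : Nat := pvFmIdx (arr.drop p.toNat) with hfm
    have hfmlt : fm < (arr.drop p.toNat).length := pvFmIdx_lt_length _ hds
    have hdslen : (arr.drop p.toNat).length = arr.length - p.toNat := by simp
    have hmn : p.toNat + fm < arr.length := by omega
    have hfind : pvFindNextMinIndex p arr = p + (fm : Int) := pvFindMin_eq arr p hp hplt
    have hwalk : pvWalk p (pvFindNextMinIndex p arr) ops = (p + (fm : Int), ops + (fm : Int)) := by
      rw [hfind]; exact pvWalk_le fm p (p + fm) ops rfl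
    have hmtn : (p + (fm : Int)).toNat = p.toNat + fm := by omega
    have hpop : PySem.List.pop? arr (pvWalk p (pvFindNextMinIndex p arr) ops).1
        = some (arr[p.toNat + fm], arr.eraseIdx (p.toNat + fm)) := by
      rw [hwalk]
      have : (p + (fm : Int)) = ((p.toNat + fm : Nat) : Int) := by omega
      rw [this]
      exact PySem.List.pop?_natCast arr (p.toNat + fm) hmn
    rw [pvEraseLoop]
    rw [if_neg harr]
    split
    · rename_i heq
      rw [hpop] at heq
      exact absurd heq (by simp)
    · rename_i r heq
      rw [hpop] at heq
      have hr2 : r.2 = arr.eraseIdx (p.toNat + fm) := by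
        injection heq with h
        rw [← h]
      have hr2len : r.2.length = arr.length - 1 := by
        rw [hr2, List.length_eraseIdx_of_lt hmn]
      rw [hwalk]
      simp only
      -- the cnt step: pvCnt (arr.drop p.toNat) = pvCnt (arr.drop (p.toNat + fm + 1)) + 1
      have hcnt : pvCnt (arr.drop p.toNat) = pvCnt (arr.drop (p.toNat + fm + 1)) + 1 := by
        have := pvCnt_drop_fm (arr.drop p.toNat) hds
        rw [List.drop_drop] at this
        rw [this]
        congr 2
      by_cases hend : p.toNat + fm = arr.length - 1
      · -- popped the rightmost element
        rw [if_pos (by omega)]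
        by_cases h1 : arr.length = 1
        · -- r.2 = [], loop ends
          have hr2nil : r.2 = [] := by
            apply List.eq_nil_of_length_eq_zero; omega
          rw [hr2nil]
          rw [pvEraseLoop]
          rw [if_pos rfl]
          have : pvCnt (arr.drop p.toNat) = 1 := by
            rw [hcnt]
            have : arr.drop (p.toNat + fm + 1) = [] := by
              apply List.drop_eq_nil_of_le; omega
            rw [this]; simp [pvCnt]
          rw [this]
          push_cast
          omega
        · -- recurse with p = len - 2 on r.2 of length len - 1
          have hlen2 : 2 ≤ arr.length := by omega
          have hr2ne : r.2 ≠ [] := by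
            intro h; rw [h] at hr2len; simp at hr2len; omega
          have hptn : (p + (fm : Int) - 1).toNat = r.2.length - 1 := by omega
          rw [ih (r.2.length) (by omega) r.2 (p + (fm : Int) - 1) (ops + (fm : Int) + 1) rfl hr2ne
            (by omega) (by omega)]
          rw [hptn]
          rw [pvCnt_drop_last r.2 hr2ne]
          rw [hcnt]
          have : arr.drop (p.toNat + fm + 1) = [] := by
            apply List.drop_eq_nil_of_le; omega
          rw [this]
          simp only [pvCnt, List.foldr_nil]
          push_cast
          omega
      · -- popped strictly inside: p' = p + fm
        rw [if_neg (by omega)]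
        have hr2ne : r.2 ≠ [] := by
          intro h; rw [h] at hr2len; simp at hr2len; omega
        rw [ih (r.2.length) (by omega) r.2 (p + (fm : Int)) (ops + (fm : Int) + 1) rfl hr2ne
          (by omega) (by rw [hr2len]; omega)]
        have hdropr : r.2.drop (p + (fm : Int)).toNat = arr.drop (p.toNat + fm + 1) := by
          rw [hmtn, hr2, pvDrop_eraseIdx]
        rw [hdropr, hcnt]
        push_cast
        omega

-- ===== VERDICT (by name: the statement is the Claim_ definition above) =====
theorem erase_in_non_decreasing_order_spec : Claim_equal_erase_in_non_decreasing_order := by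
  intro arr _
  unfold Spec_erase_in_non_decreasing_order erase_in_non_decreasing_order
    erase_in_non_decreasing_order_alt
  cases harr : arr with
  | nil => simp [pvEraseLoop]
  | cons x t =>
    rw [if_neg (by simp)]
    have h := pvMainLoop (x :: t).length (x :: t) 0 0 rfl (by simp) (by omega) (by simp)
    rw [h]
    simp only [Int.toNat_zero, List.drop_zero]
    unfold pvCnt
    omega
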